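-- pv_equiv track=rewrite | github.com/openradx/radis | radis/parade_search/utils/document_utils.py | snippet
-- ===== SOURCE A (Python) =====
-- def find_all_occurrences(text, substring):
--     """
--     Returns a list of all occurrences of the substring in the text.
--
--     :param text: The string to search within.
--     :param substring: The substring to search for.
--     :return: A list of indices where the substring occurs in the text.
--     """
--     indices = []
--     start = 0
--     while True:
--         index = text.find(substring, start)
--         if index == -1:
--             break
--         indices.append(index)
--         start = index + 1  # Move start to the next character after the found substring
--     return indices
--
-- def snippet(text: str, start_tag: str, max_num_chars: int) -> list:
--     indices = find_all_occurrences(text, start_tag)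
--     snippets = []
--     last_end = 0
--     for index in indices:
--         if index < last_end:
--             continue
--         start = max(0, text.rfind(" ", 0, index - max_num_chars))
--         end = text.find(" ", index + len(start_tag) + max_num_chars + 8)
--         if end == -1:
--             end = len(text)
--         snippets.append(text[start:end])
--         last_end = end
--
--     return snippets
-- ===== SOURCE B (Python) =====
-- def snippet(text: str, start_tag: str, max_num_chars: int) -> list:
--     # One pass: find each occurrence from the current position directly,
--     # instead of materialising the full overlapping-occurrence list and skipping.
--     snippets = []
--     pos = 0
--     while True:
--         index = text.find(start_tag, pos)
--         if index == -1:
--             break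
--         start = max(0, text.rfind(" ", 0, index - max_num_chars))
--         end = text.find(" ", index + len(start_tag) + max_num_chars + 8)
--         if end == -1:
--             end = len(text)
--         snippets.append(text[start:end])
--         pos = max(end, index + 1)  # always advance past this occurrence
--     return snippets
-- ===== Notes on version B (the rewrite author's own statement) =====
-- stated objective: simpler
-- what changed: Fused find_all_occurrences and the snippet loop into one forward pass that searches for the next tag occurrence directly from max(end, index+1), eliminating the full overlapping-occurrence list and the skip branch.
import Mathlib
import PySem

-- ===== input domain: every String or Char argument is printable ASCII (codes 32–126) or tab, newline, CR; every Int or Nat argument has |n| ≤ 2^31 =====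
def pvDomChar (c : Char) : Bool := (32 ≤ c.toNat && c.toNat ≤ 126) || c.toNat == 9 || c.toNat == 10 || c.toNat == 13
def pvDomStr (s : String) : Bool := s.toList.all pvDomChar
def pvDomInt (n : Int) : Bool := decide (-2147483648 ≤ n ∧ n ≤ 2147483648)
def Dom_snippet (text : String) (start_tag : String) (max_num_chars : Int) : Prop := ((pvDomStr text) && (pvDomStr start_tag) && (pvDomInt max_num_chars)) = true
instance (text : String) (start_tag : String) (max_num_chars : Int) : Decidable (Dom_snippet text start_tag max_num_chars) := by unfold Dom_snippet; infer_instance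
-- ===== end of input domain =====

-- B fuses find_all_occurrences and the snippet loop into ONE search pass (no occurrence list, no skip branch); objective: simpler.

-- ===== PORT A =====
-- find_all_occurrences: 'while True: index = text.find(substring, start) …'; the start position
-- strictly increases each iteration and text.find returns -1 once start > len(text), so
-- len(text) + 2 fuel steps always reach the break.
def pvFindAllLoop (text substring : String) (fuel : Nat) (start : Int) (indices : List Int) : List Int :=
  match fuel with
  | 0 => indices
  | f + 1 =>
    let index := PySem.Str.findFrom text substring start
    if index = -1 then indices
    else pvFindAllLoop text substring f (index + 1) (indices ++ [index])

def find_all_occurrences (text substring : String) : List Int :=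
  pvFindAllLoop text substring (text.toList.length + 2) 0 []

def snippet (text : String) (start_tag : String) (max_num_chars : Int) : List String :=
  let indices := find_all_occurrences text start_tag
  let r := indices.foldl (fun (st : List String × Int) index =>
      if index < st.2 then st
      else
        let start := max 0 (PySem.Str.rfindFrom text " " 0 (some (index - max_num_chars)))
        let e := PySem.Str.findFrom text " " (index + PySem.Str.len start_tag + max_num_chars + 8)
        let e := if e = -1 then PySem.Str.len text else e
        (st.1 ++ [PySem.Str.slice text (some start) (some e)], e)
    ) ([], 0)
  r.1

-- ===== PORT B =====
-- one pass: pos = max(end, index + 1) strictly increases, so len(text) + 2 fuel steps suffice.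
def pvSnipLoop (text start_tag : String) (max_num_chars : Int) (fuel : Nat) (pos : Int) (snippets : List String) : List String :=
  match fuel with
  | 0 => snippets
  | f + 1 =>
    let index := PySem.Str.findFrom text start_tag pos
    if index = -1 then snippets
    else
      let start := max 0 (PySem.Str.rfindFrom text " " 0 (some (index - max_num_chars)))
      let e := PySem.Str.findFrom text " " (index + PySem.Str.len start_tag + max_num_chars + 8)
      let e := if e = -1 then PySem.Str.len text else e
      pvSnipLoop text start_tag max_num_chars f (max e (index + 1))
        (snippets ++ [PySem.Str.slice text (some start) (some e)])

def snippet_alt (text : String) (start_tag : String) (max_num_chars : Int) : List String :=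
  pvSnipLoop text start_tag max_num_chars (text.toList.length + 2) 0 []

-- ===== PRECONDITION & SPEC =====
def Spec_snippet (text : String) (start_tag : String) (max_num_chars : Int) (out : List String) : Prop := out = snippet_alt text start_tag max_num_chars
instance (text : String) (start_tag : String) (max_num_chars : Int) (out : List String) : Decidable (Spec_snippet text start_tag max_num_chars out) := by unfold Spec_snippet; infer_instance

-- ===== CLAIM (what is proved, stated in full; the proofs are below) =====
def Claim_equal_snippet : Prop := ∀ (text : String) (start_tag : String) (max_num_chars : Int), Dom_snippet text start_tag max_num_chars → Spec_snippet text start_tag max_num_chars (snippet text start_tag max_num_chars)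

-- ===== LEMMAS AND PROOFS =====

-- CPython quirk kept by PySem: a search start past len(s) yields -1 even for the empty needle
theorem pvFfromTop (s sub : String) (q : Int) (h : (s.toList.length : Int) < q) :
    PySem.Str.findFrom s sub q none = -1 := by
  simp only [PySem.Str.findFrom_eq, PySem.Chars.findFrom]
  split_ifs <;> omega

theorem pvFfromBounds (s sub : String) (q : Int) (h : PySem.Str.findFrom s sub q none ≠ -1) :
    0 ≤ PySem.Str.findFrom s sub q none ∧ PySem.Str.findFrom s sub q none ≤ (s.toList.length : Int) := by
  have hle := PySem.Chars.find_le_length (List.drop (if q < 0 then if q + ↑s.toList.length < 0 then (0:Int) else q + ↑s.toList.length else q).toNat (List.take ((↑s.toList.length : Int)).toNat s.toList)) sub.toList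
  have hge := PySem.Chars.neg_one_le_find (List.drop (if q < 0 then if q + ↑s.toList.length < 0 then (0:Int) else q + ↑s.toList.length else q).toNat (List.take ((↑s.toList.length : Int)).toNat s.toList)) sub.toList
  simp only [PySem.Str.findFrom_eq, PySem.Chars.findFrom] at *
  split_ifs at * <;> simp_all [List.length_drop] <;> omega

theorem pvFfromGe (s sub : String) (q : Int) (h0 : 0 ≤ q) (h : PySem.Str.findFrom s sub q none ≠ -1) :
    q ≤ PySem.Str.findFrom s sub q none := by
  have hge := PySem.Chars.neg_one_le_find (List.drop (if q < 0 then if q + ↑s.toList.length < 0 then (0:Int) else q + ↑s.toList.length else q).toNat (List.take ((↑s.toList.length : Int)).toNat s.toList)) sub.toList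
  simp only [PySem.Str.findFrom_eq, PySem.Chars.findFrom] at *
  split_ifs at * <;> omega

-- no occurrence at or after p → none at or after any q ≥ p
theorem pvFfromNoneStable (s sub : String) (p q : Int) (h0 : 0 ≤ p) (hpq : p ≤ q)
    (h : PySem.Str.findFrom s sub p none = -1) : PySem.Str.findFrom s sub q none = -1 := by
  by_cases hq : (s.toList.length : Int) < q
  · exact pvFfromTop s sub q hq
  · have hp : p ≤ (s.toList.length : Int) := by omega
    have h1 := (PySem.Chars.findFrom_natCast_eq_neg_one_iff s.toList sub.toList p.toNat (by omega)).mp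
      (by rw [Int.toNat_of_nonneg h0]; simpa [PySem.Str.findFrom_eq] using h)
    rw [PySem.Str.findFrom_eq, show q = ((q.toNat : Nat) : Int) by omega]
    refine (PySem.Chars.findFrom_natCast_eq_neg_one_iff s.toList sub.toList q.toNat (by omega)).mpr ?_
    intro hinf
    have hsfx : List.drop q.toNat s.toList <:+ List.drop p.toNat s.toList := by
      rw [show q.toNat = p.toNat + (q.toNat - p.toNat) by omega, ← List.drop_drop]
      exact List.drop_suffix _ _
    exact h1 (hinf.trans hsfx.isInfix)

-- the first occurrence at or after p is also the first at or after any q between p and it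
theorem pvFfromStable (s sub : String) (p q : Int) (h0 : 0 ≤ p) (hpq : p ≤ q)
    (hne : PySem.Str.findFrom s sub p none ≠ -1)
    (hqi : q ≤ PySem.Str.findFrom s sub p none) :
    PySem.Str.findFrom s sub q none = PySem.Str.findFrom s sub p none := by
  have hbd := pvFfromBounds s sub p hne
  have hp : p ≤ (s.toList.length : Int) := by
    by_contra hc; exact hne (pvFfromTop s sub p (by omega))
  have hq : q ≤ (s.toList.length : Int) := by omega
  have hcast : ((p.toNat : Nat) : Int) = p := Int.toNat_of_nonneg h0
  have hcastq : ((q.toNat : Nat) : Int) = q := Int.toNat_of_nonneg (by omega)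
  have specP := PySem.Chars.findFrom_natCast_spec s.toList sub.toList p.toNat (by omega)
    (by rw [hcast]; simpa [PySem.Str.findFrom_eq] using hne)
  rw [hcast] at specP
  simp only [← PySem.Str.findFrom_eq] at specP
  obtain ⟨hple, hpref, hmin⟩ := specP
  set i := PySem.Str.findFrom s sub p none with hi
  have hinfq : sub.toList <:+: List.drop q.toNat s.toList := by
    have hsfx : List.drop i.toNat s.toList <:+ List.drop q.toNat s.toList := by
      rw [show i.toNat = q.toNat + (i.toNat - q.toNat) by omega, ← List.drop_drop]
      exact List.drop_suffix _ _
    exact hpref.isInfix.trans hsfx.isInfix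
  have hneq : PySem.Str.findFrom s sub q none ≠ -1 := by
    rw [PySem.Str.findFrom_eq, ← hcastq]
    rw [Ne, PySem.Chars.findFrom_natCast_eq_neg_one_iff s.toList sub.toList q.toNat (by omega)]
    simpa using hinfq
  have specQ := PySem.Chars.findFrom_natCast_spec s.toList sub.toList q.toNat (by omega)
    (by rw [hcastq]; simpa [PySem.Str.findFrom_eq] using hneq)
  rw [hcastq] at specQ
  simp only [← PySem.Str.findFrom_eq] at specQ
  obtain ⟨hqle, hqref, hqmin⟩ := specQ
  set r := PySem.Str.findFrom s sub q none with hr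
  have hrbd := pvFfromBounds s sub q hneq
  rw [← hr] at hrbd
  rcases lt_trichotomy r.toNat i.toNat with hlt | heq | hgt
  · exact absurd hqref (hmin r.toNat (by omega) hlt)
  · omega
  · exact absurd hpref (hqmin i.toNat (by omega) hgt)

-- shared window abbreviations (proof-only)
def pvWin (text start_tag : String) (mnc i : Int) : String :=
  PySem.Str.slice text
    (some (max 0 (PySem.Str.rfindFrom text " " 0 (some (i - mnc)))))
    (some (let e := PySem.Str.findFrom text " " (i + PySem.Str.len start_tag + mnc + 8)
           if e = -1 then PySem.Str.len text else e))

def pvEnd (text start_tag : String) (mnc i : Int) : Int :=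
  let e := PySem.Str.findFrom text " " (i + PySem.Str.len start_tag + mnc + 8)
  if e = -1 then PySem.Str.len text else e

theorem pvEndBounds (text start_tag : String) (mnc i : Int) :
    0 ≤ pvEnd text start_tag mnc i ∧ pvEnd text start_tag mnc i ≤ (text.toList.length : Int) := by
  unfold pvEnd
  by_cases h : PySem.Str.findFrom text " " (i + PySem.Str.len start_tag + mnc + 8) = -1
  · rw [if_pos h]
    simp [PySem.Str.len_eq]
  · rw [if_neg h]
    exact pvFfromBounds text " " _ h

-- accumulator-free forms of the two loops
def pvOcc (text sub : String) (fuel : Nat) (p : Int) : List Int :=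
  match fuel with
  | 0 => []
  | f + 1 =>
    let i := PySem.Str.findFrom text sub p
    if i = -1 then [] else i :: pvOcc text sub f (i + 1)

def pvProcA (text start_tag : String) (mnc : Int) : List Int → Int → List String
  | [], _ => []
  | i :: rest, le =>
    if i < le then pvProcA text start_tag mnc rest le
    else pvWin text start_tag mnc i :: pvProcA text start_tag mnc rest (pvEnd text start_tag mnc i)

def pvB (text start_tag : String) (mnc : Int) (fuel : Nat) (p : Int) : List String :=
  match fuel with
  | 0 => []
  | f + 1 =>
    let i := PySem.Str.findFrom text start_tag p
    if i = -1 then []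
    else pvWin text start_tag mnc i :: pvB text start_tag mnc f (max (pvEnd text start_tag mnc i) (i + 1))

-- A's fold body, named (definitionally equal to the lambda in snippet)
def pvStep (text start_tag : String) (mnc : Int) (st : List String × Int) (index : Int) : List String × Int :=
  if index < st.2 then st
  else (st.1 ++ [pvWin text start_tag mnc index], pvEnd text start_tag mnc index)

theorem pvStep_eq (text start_tag : String) (mnc : Int) :
    (fun (st : List String × Int) index =>
      if index < st.2 then st
      else
        let start := max 0 (PySem.Str.rfindFrom text " " 0 (some (index - mnc)))
        let e := PySem.Str.findFrom text " " (index + PySem.Str.len start_tag + mnc + 8)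
        let e := if e = -1 then PySem.Str.len text else e
        (st.1 ++ [PySem.Str.slice text (some start) (some e)], e)) = pvStep text start_tag mnc := by
  funext st index
  rfl

theorem pvFindAllLoop_eq (text sub : String) (fuel : Nat) :
    ∀ (p : Int) (acc : List Int), pvFindAllLoop text sub fuel p acc = acc ++ pvOcc text sub fuel p := by
  induction fuel with
  | zero => intro p acc; simp [pvFindAllLoop, pvOcc]
  | succ f ih =>
    intro p acc
    simp only [pvFindAllLoop, pvOcc]
    by_cases h : PySem.Str.findFrom text sub p = -1
    · rw [if_pos h, if_pos h, List.append_nil]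
    · rw [if_neg h, if_neg h, ih]
      simp only [List.append_assoc, List.singleton_append]

theorem pvSnipLoop_eq (text start_tag : String) (mnc : Int) (fuel : Nat) :
    ∀ (p : Int) (acc : List String),
      pvSnipLoop text start_tag mnc fuel p acc = acc ++ pvB text start_tag mnc fuel p := by
  induction fuel with
  | zero => intro p acc; simp [pvSnipLoop, pvB]
  | succ f ih =>
    intro p acc
    simp only [pvSnipLoop, pvB]
    by_cases h : PySem.Str.findFrom text start_tag p = -1
    · rw [if_pos h, if_pos h, List.append_nil]
    · rw [if_neg h, if_neg h, ih]
      simp only [pvWin, pvEnd, List.append_assoc, List.singleton_append]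

theorem pvFoldA_eq (text start_tag : String) (mnc : Int) :
    ∀ (idx : List Int) (acc : List String) (le : Int),
      (idx.foldl (pvStep text start_tag mnc) (acc, le)).1 = acc ++ pvProcA text start_tag mnc idx le := by
  intro idx
  induction idx with
  | nil => intro acc le; simp [pvProcA]
  | cons i rest ih =>
    intro acc le
    simp only [List.foldl_cons, pvProcA, pvStep]
    by_cases h : i < le
    · rw [if_pos h, if_pos h, ih]
    · rw [if_neg h, if_neg h, ih]
      simp only [List.append_assoc, List.singleton_append]

-- the core correspondence: A's fold over the occurrence list from p with last_end le
-- equals B's single pass started at max p le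
theorem pvCore (text start_tag : String) (mnc : Int) :
    ∀ (f : Nat) (p le : Int) (g : Nat), 0 ≤ p → 0 ≤ le → le ≤ (text.toList.length : Int) →
      (text.toList.length : Int) + 1 - p ≤ (f : Int) →
      (text.toList.length : Int) + 1 - max p le ≤ (g : Int) →
      pvProcA text start_tag mnc (pvOcc text start_tag f p) le
        = pvB text start_tag mnc g (max p le) := by
  intro f
  induction f with
  | zero =>
    intro p le g hp hle hleL hf hg
    have h1 : PySem.Str.findFrom text start_tag (max p le) = -1 :=
      pvFfromTop _ _ _ (by have := le_max_left p le; omega)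
    cases g with
    | zero => simp only [pvOcc, pvProcA, pvB]
    | succ g => simp only [pvOcc, pvProcA, pvB]; rw [if_pos h1]
  | succ f ih =>
    intro p le g hp hle hleL hf hg
    simp only [pvOcc]
    by_cases h : PySem.Str.findFrom text start_tag p = -1
    · -- no occurrence from p: also none from max p le
      have hnone : PySem.Str.findFrom text start_tag (max p le) = -1 :=
        pvFfromNoneStable text start_tag p (max p le) hp (le_max_left _ _) h
      rw [if_pos h]
      cases g with
      | zero => simp only [pvProcA, pvB]
      | succ g => simp only [pvProcA, pvB]; rw [if_pos hnone]
    · rw [if_neg h]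
      have hge := pvFfromGe text start_tag p hp h
      have hbd := pvFfromBounds text start_tag p h
      simp only [pvProcA]
      by_cases hskip : PySem.Str.findFrom text start_tag p < le
      · -- A skips this occurrence; B never saw it
        rw [if_pos hskip]
        have hmax1 : max (PySem.Str.findFrom text start_tag p + 1) le = le := by omega
        have hmax2 : max p le = le := by omega
        rw [ih (PySem.Str.findFrom text start_tag p + 1) le g (by omega) hle hleL (by omega)
            (by rw [hmax1, ← hmax2]; exact hg), hmax1, hmax2]
      · -- A emits; B finds the same occurrence from max p le
        rw [if_neg hskip]
        have hfind : PySem.Str.findFrom text start_tag (max p le) = PySem.Str.findFrom text start_tag p :=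
          pvFfromStable text start_tag p (max p le) hp (le_max_left _ _) h
            (max_le (by omega) (by omega))
        obtain ⟨he0, heL⟩ := pvEndBounds text start_tag mnc (PySem.Str.findFrom text start_tag p)
        cases g with
        | zero => omega
        | succ g =>
          simp only [pvB]
          rw [hfind, if_neg h]
          rw [ih (PySem.Str.findFrom text start_tag p + 1) (pvEnd text start_tag mnc (PySem.Str.findFrom text start_tag p)) g
              (by omega) he0 heL (by omega) (by omega)]
          rw [max_comm (PySem.Str.findFrom text start_tag p + 1) _]

-- ===== VERDICT (by name: the statement is the Claim_ definition above) =====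
theorem snippet_spec : Claim_equal_snippet := by
  intro text start_tag mnc _
  unfold Spec_snippet snippet snippet_alt find_all_occurrences
  rw [pvSnipLoop_eq, pvFindAllLoop_eq]
  simp only [List.nil_append]
  rw [pvStep_eq, pvFoldA_eq]
  simp only [List.nil_append]
  rw [pvCore text start_tag mnc (text.toList.length + 2) 0 0 (text.toList.length + 2)
      le_rfl le_rfl (by positivity) (by push_cast; omega) (by push_cast; omega)]
  rw [max_self]
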